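-- pv_equiv track=rewrite | github.com/JamesRCall/Stop-Sign-RL | tools/export_replica_stencil.py | _tile_starts
-- ===== SOURCE A (Python) =====
-- def _tile_starts(total_px: int, window_px: int, stride_px: int) -> list[int]:
--     if total_px <= window_px:
--         return [0]
--     starts = [0]
--     pos = 0
--     while True:
--         nxt = pos + stride_px
--         if nxt + window_px >= total_px:
--             last = max(0, total_px - window_px)
--             if last != starts[-1]:
--                 starts.append(last)
--             break
--         starts.append(nxt)
--         pos = nxt
--     return starts
-- ===== SOURCE B (Python) =====
-- def _tile_starts(total_px: int, window_px: int, stride_px: int) -> list[int]: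
--     if total_px <= window_px:
--         return [0]
--     last = total_px - window_px
--     n = -(-last // stride_px)  # ceil(last/stride): how many strided starts precede `last`
--     out = [last]
--     for i in range(n - 1, -1, -1):
--         out.append(i * stride_px)
--     out.reverse()
--     return out
-- ===== Notes on version B (the rewrite author's own statement) =====
-- stated objective: alternative
-- what changed: Replaces A's forward while-True accumulation (repeated addition with a per-step break test) by computing the count of strided starts in closed form with one ceiling division, generating each start independently by multiplication while building the list back-to-front (last start first), then reversing.
import Mathlib
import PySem

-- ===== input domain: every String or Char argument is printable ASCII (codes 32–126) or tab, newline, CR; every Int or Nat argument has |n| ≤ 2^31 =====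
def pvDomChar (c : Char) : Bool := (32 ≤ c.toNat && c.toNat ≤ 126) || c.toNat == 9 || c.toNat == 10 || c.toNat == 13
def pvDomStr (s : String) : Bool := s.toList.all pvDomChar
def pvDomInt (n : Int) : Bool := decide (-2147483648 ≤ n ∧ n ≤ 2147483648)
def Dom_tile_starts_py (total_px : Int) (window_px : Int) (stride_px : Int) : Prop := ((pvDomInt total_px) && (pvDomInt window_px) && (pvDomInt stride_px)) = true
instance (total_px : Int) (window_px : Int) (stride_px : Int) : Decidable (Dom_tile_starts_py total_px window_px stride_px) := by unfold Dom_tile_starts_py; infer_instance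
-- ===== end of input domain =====

-- ===== PORT A =====
-- Header: B computes the number of strided starts by one ceiling division and builds the list
-- back-to-front by multiplication, instead of A's forward accumulation loop (alternative
-- decomposition; no speed claim).
-- Fuel-bounded transliteration of A's `while True` loop; the accumulator is kept reversed
-- (cons = append), so `starts[-1]` is the head. Fuel is only a totality device: under
-- Pre_ (stride > 0) it is never exhausted.
def tileLoopA (total_px window_px stride_px : Int) : Nat → Int → List Int → List Int
  | 0, _, rev => rev.reverse
  | fuel+1, pos, rev =>
    let nxt := pos + stride_px
    if total_px ≤ nxt + window_px then
      let last := max 0 (total_px - window_px)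
      if rev.headD 0 ≠ last then (last :: rev).reverse else rev.reverse
    else tileLoopA total_px window_px stride_px fuel nxt (nxt :: rev)

def tile_starts_py (total_px : Int) (window_px : Int) (stride_px : Int) : List Int :=
  if total_px ≤ window_px then [0]
  else tileLoopA total_px window_px stride_px ((total_px - window_px).toNat + 1) 0 [0]

-- ===== PORT B =====
-- Transliteration of Source B: ceiling division for the count, then a countdown loop appending
-- i*stride to [last], then reverse.
def tile_starts_py_alt (total_px : Int) (window_px : Int) (stride_px : Int) : List Int :=
  if total_px ≤ window_px then [0]
  else
    let last := total_px - window_px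
    let n := -(PySem.Int.floordiv (-last) stride_px)
    ((PySem.List.pyRange (n - 1) (-1) (-1)).foldl
        (fun out i => out ++ [i * stride_px]) [last]).reverse

-- ===== PRECONDITION & SPEC =====
-- Pre_ excludes stride_px ≤ 0 when total_px > window_px: there A's while-True loop never
-- reaches its break condition and diverges (no value is returned), so nothing is claimed.
def Pre_tile_starts_py (total_px : Int) (window_px : Int) (stride_px : Int) : Prop :=
  total_px ≤ window_px ∨ 0 < stride_px
instance (total_px : Int) (window_px : Int) (stride_px : Int) : Decidable (Pre_tile_starts_py total_px window_px stride_px) := by unfold Pre_tile_starts_py; infer_instance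
def pvWitness_tile_starts_py : Int × Int × Int := (10, 4, 3)
def Spec_tile_starts_py (total_px : Int) (window_px : Int) (stride_px : Int) (out : List Int) : Prop := out = tile_starts_py_alt total_px window_px stride_px
instance (total_px : Int) (window_px : Int) (stride_px : Int) (out : List Int) : Decidable (Spec_tile_starts_py total_px window_px stride_px out) := by unfold Spec_tile_starts_py; infer_instance

-- ===== CLAIM =====
def Claim_equal_tile_starts_py : Prop := ∀ (total_px : Int) (window_px : Int) (stride_px : Int), Dom_tile_starts_py total_px window_px stride_px → Pre_tile_starts_py total_px window_px stride_px → Spec_tile_starts_py total_px window_px stride_px (tile_starts_py total_px window_px stride_px)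

-- ===== LEMMAS AND PROOFS =====

lemma pyRange_pos_nil (a b s : Int) (hs : 0 < s) (h : b ≤ a) :
    PySem.List.pyRange a b s = [] := by
  rw [PySem.List.pyRange_of_pos _ _ hs]
  simp [not_lt.2 h]

lemma pyRange_pos_cons (a b s : Int) (hs : 0 < s) (hab : a < b) :
    PySem.List.pyRange a b s = a :: PySem.List.pyRange (a + s) b s := by
  rw [PySem.List.pyRange_of_pos _ _ hs, PySem.List.pyRange_of_pos _ _ hs]
  have hcnt : (if a < b then ((b - a + s - 1) / s).toNat else 0)
      = (if a + s < b then ((b - (a + s) + s - 1) / s).toNat else 0) + 1 := by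
    rw [if_pos hab]
    have h1 : b - a + s - 1 = (b - a - 1) + 1 * s := by ring
    have h2 : (b - a + s - 1) / s = (b - a - 1) / s + 1 := by
      rw [h1, Int.add_mul_ediv_right _ _ (by omega : s ≠ 0)]
    by_cases h : a + s < b
    · rw [if_pos h]
      have : b - (a + s) + s - 1 = b - a - 1 := by ring
      rw [this, h2]
      have : 0 ≤ (b - a - 1) / s := Int.ediv_nonneg (by omega) (by omega)
      omega
    · rw [if_neg h]
      have h0 : (b - a - 1) / s = 0 := Int.ediv_eq_zero_of_lt (by omega) (by omega)
      rw [h2, h0]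
      simp
  rw [hcnt, List.range_succ_eq_map, List.map_cons, List.map_map]
  congr 1
  · push_cast; ring
  · congr 1
    funext k
    simp only [Function.comp]
    push_cast
    ring

-- A's loop, started at pos, produces the remaining strided starts then the final start.
lemma loopA_eq (total window s : Int) (hs : 0 < s) :
    ∀ (fuel : Nat) (pos : Int) (rest : List Int),
      0 ≤ pos → pos < total - window → (total - window - pos).toNat ≤ fuel →
      tileLoopA total window s fuel pos (pos :: rest) =
        (pos :: rest).reverse ++ PySem.List.pyRange (pos + s) (total - window) s
          ++ [total - window] := by
  intro fuel
  induction fuel with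
  | zero => intro pos rest hp hlt hf; omega
  | succ f ih =>
    intro pos rest hp hlt hf
    by_cases hbr : total ≤ pos + s + window
    · have hnil : PySem.List.pyRange (pos + s) (total - window) s = [] :=
        pyRange_pos_nil _ _ _ hs (by omega)
      have hmax : max 0 (total - window) = total - window := by omega
      simp only [tileLoopA, if_pos hbr, hmax, hnil, List.headD_cons]
      rw [if_pos (by omega : pos ≠ total - window)]
      simp
    · have hlt' : pos + s < total - window := by omega
      simp only [tileLoopA, if_neg hbr]
      rw [ih (pos + s) (pos :: rest) (by omega) hlt' (by omega)]
      rw [pyRange_pos_cons _ _ _ hs hlt']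
      simp

-- B's append-fold unrolled: it just maps and concatenates.
lemma foldl_append_mul (s : Int) :
    ∀ (L : List Int) (acc : List Int),
      L.foldl (fun out i => out ++ [i * s]) acc = acc ++ L.map (fun i => i * s) := by
  intro L
  induction L with
  | nil => simp
  | cons x xs ih => intro acc; simp [List.foldl, ih]

-- The upward range with step s is the mapped unit range of length n = ceil(last/s).
lemma pyRange_step_eq_map (last s : Int) (hs : 0 < s) (hl : 0 < last) :
    PySem.List.pyRange 0 last s =
      (PySem.List.pyRange 0 (-(PySem.Int.floordiv (-last) s)) 1).map (fun i => i * s) := by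
  set n := -(PySem.Int.floordiv (-last) s) with hn
  have hb : (n - 1) * s < last ∧ last ≤ n * s :=
    (PySem.Int.neg_floordiv_neg_eq_iff_of_pos hs).1 hn.symm
  have hns : n * s - s = (n - 1) * s := by ring
  have hnpos : 0 < n := by nlinarith [hb.1, hb.2]
  have hcnt : (last - 0 + s - 1) / s = n := by
    have := (PySem.Int.floordiv_eq_iff_of_pos (a := last - 0 + s - 1) (q := n) hs)
    rw [PySem.Int.floordiv_eq_ediv_of_pos hs] at this
    apply this.2
    constructor <;> nlinarith [hb.1, hb.2]
  rw [PySem.List.pyRange_of_pos _ _ hs, PySem.List.pyRange_one]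
  rw [if_pos (by omega : (0:Int) < last), hcnt]
  simp only [sub_zero, List.map_map]
  congr 1
  funext k
  simp [Function.comp, mul_comm]

-- ===== VERDICT =====
theorem tile_starts_py_spec : Claim_equal_tile_starts_py := by
  intro total window s _ hpre
  unfold Spec_tile_starts_py tile_starts_py tile_starts_py_alt
  by_cases h : total ≤ window
  · simp [h]
  · have hs : 0 < s := hpre.resolve_left h
    rw [if_neg h, if_neg h]
    rw [loopA_eq total window s hs _ 0 [] le_rfl (by omega) (by omega)]
    show _ = ((PySem.List.pyRange (-(PySem.Int.floordiv (-(total - window)) s) - 1) (-1) (-1)).foldl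
        (fun out i => out ++ [i * s]) [total - window]).reverse
    rw [foldl_append_mul, PySem.List.pyRange_neg_one_eq_reverse]
    rw [List.reverse_append, ← List.map_reverse, List.reverse_reverse]
    have h3 : -(PySem.Int.floordiv (-(total - window)) s) - 1 + 1
        = -(PySem.Int.floordiv (-(total - window)) s) := by ring
    have h4 : (-1 : Int) + 1 = 0 := by norm_num
    rw [h3, h4, ← pyRange_step_eq_map (total - window) s hs (by omega)]
    rw [pyRange_pos_cons 0 (total - window) s hs (by omega)]
    simp
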